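-- pv_equiv track=rewrite | github.com/agdiwijaya/Ravel_Knit_Words | ravelknit.py | ravel
-- ===== SOURCE A (Python) =====
-- def ravel(n):
--     hasil = ""
--     for baris in range(len(n)):
--         for kolom in range(baris + 1):
--             hasil += n[kolom]
--             hasil += ""
--     hasil += ""
--     return hasil
-- ===== SOURCE B (Python) =====
-- def ravel(n):
--     hasil = ""
--     cur = ""
--     for i in range(len(n)):
--         cur += n[i]
--         hasil += cur
--     return hasil
-- ===== Notes on version B (the rewrite author's own statement) =====
-- stated objective: faster
-- what changed: Replaces the nested loop that re-reads characters n[0..i] for every row with a single loop maintaining a running prefix accumulator, removing the inner scan.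
import Mathlib
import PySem

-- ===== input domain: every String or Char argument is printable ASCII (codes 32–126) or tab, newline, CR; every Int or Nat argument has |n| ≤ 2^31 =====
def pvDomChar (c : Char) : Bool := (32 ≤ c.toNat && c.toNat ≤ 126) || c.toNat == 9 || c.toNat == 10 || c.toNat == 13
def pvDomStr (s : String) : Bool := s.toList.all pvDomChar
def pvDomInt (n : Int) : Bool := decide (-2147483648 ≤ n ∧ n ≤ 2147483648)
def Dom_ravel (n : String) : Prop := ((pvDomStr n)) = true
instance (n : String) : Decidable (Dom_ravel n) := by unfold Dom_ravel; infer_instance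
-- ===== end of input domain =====

-- B replaces A's nested loop (which re-reads n[0..i] for every row) by a single loop
-- carrying a running prefix accumulator; fewer character reads, same output.

-- ===== PORT A =====
-- A: for baris in range(len(n)): for kolom in range(baris+1): hasil += n[kolom]
def ravel (n : String) : String :=
  let chars := n.toList
  String.mk ((List.range chars.length).foldl
    (fun hasil baris =>
      (List.range (baris + 1)).foldl
        (fun h kolom => h ++ [chars.getD kolom ' ']) hasil)
    [])

-- ===== PORT B =====
-- B: single loop, state (hasil, cur); cur += n[i]; hasil += cur
def ravel_alt (n : String) : String :=
  let chars := n.toList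
  let r := (List.range chars.length).foldl
    (fun (st : List Char × List Char) i =>
      let cur := st.2 ++ [chars.getD i ' ']
      (st.1 ++ cur, cur))
    ([], [])
  String.mk r.1

-- ===== PRECONDITION & SPEC =====
def Spec_ravel (n : String) (out : String) : Prop := out = ravel_alt n
instance (n : String) (out : String) : Decidable (Spec_ravel n out) := by unfold Spec_ravel; infer_instance

-- ===== CLAIM (what is proved, stated in full; the proofs are below) =====
def Claim_equal_ravel : Prop := ∀ (n : String), Dom_ravel n → Spec_ravel n (ravel n)

-- ===== LEMMAS AND PROOFS =====

theorem ravel_inner (chars : List Char) (acc : List Char) (m : Nat) (hm : m ≤ chars.length) :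
    (List.range m).foldl (fun h kolom => h ++ [chars.getD kolom ' ']) acc
      = acc ++ chars.take m := by
  induction m generalizing acc with
  | zero => simp
  | succ k ih =>
      have hk : k < chars.length := Nat.lt_of_lt_of_le (Nat.lt_succ_self k) hm
      rw [List.range_succ, List.foldl_append, ih acc (Nat.le_of_lt hk)]
      simp only [List.foldl_cons, List.foldl_nil]
      rw [List.getD_eq_getElem?_getD, List.getElem?_eq_getElem hk, List.take_add_one,
          List.getElem?_eq_getElem hk]
      simp

theorem ravel_loops (chars : List Char) (m : Nat) (hm : m ≤ chars.length) :
    (List.range m).foldl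
      (fun (st : List Char × List Char) i =>
        let cur := st.2 ++ [chars.getD i ' ']
        (st.1 ++ cur, cur))
      ([], [])
    = ((List.range m).foldl
        (fun hasil baris =>
          (List.range (baris + 1)).foldl
            (fun h kolom => h ++ [chars.getD kolom ' ']) hasil)
        [],
       chars.take m) := by
  induction m with
  | zero => simp
  | succ k ih =>
      have hk : k < chars.length := Nat.lt_of_lt_of_le (Nat.lt_succ_self k) hm
      rw [List.range_succ, List.foldl_append, List.foldl_append,
          ih (Nat.le_of_lt hk)]
      simp only [List.foldl_cons, List.foldl_nil]
      rw [ravel_inner chars _ (k + 1) hm]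
      rw [List.getD_eq_getElem?_getD, List.getElem?_eq_getElem hk, List.take_add_one,
          List.getElem?_eq_getElem hk]
      simp

-- ===== VERDICT (by name: the statement is the Claim_ definition above) =====
theorem ravel_spec : Claim_equal_ravel := by
  intro n _
  unfold Spec_ravel ravel ravel_alt
  show String.mk _ = String.mk (Prod.fst _)
  rw [ravel_loops n.toList n.toList.length (Nat.le_refl _)]
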